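-- pv_equiv track=rewrite | github.com/lohiya-saurabh/DSA | DSA-1/Queues/gen_seq.py | solve
-- ===== SOURCE A (Python) =====
-- def solve(A):
--     gen = ["1", "2", "3"]
--     res = []
--     curr_queue = []
--     flag = True
--     while len(res) < A:
--         next_queue_len = len(res)
--         while curr_queue or flag:
--             flag = False
--             curr_elem = curr_queue.pop(0) if curr_queue else ""
--             for elem in gen:
--                 if len(res) < A:
--                     res.append(curr_elem + elem)
--                 else:
--                     break
--         curr_queue = res[next_queue_len:]
--     return [int(x) for x in res]
-- ===== SOURCE B (Python) =====
-- def solve(A):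
--     # i-th number (1-based) is i written in bijective base 3 with digit set "123";
--     # build that string directly per index, no queue/BFS needed.
--     res = []
--     for i in range(1, A + 1):
--         s = ""
--         n = i
--         while n:
--             n, r = divmod(n - 1, 3)
--             s = "123"[r] + s
--         res.append(int(s))
--     return res
-- ===== Notes on version B (the rewrite author's own statement) =====
-- stated objective: alternative
-- what changed: Replaced the BFS queue simulation (list pop(0), slicing, flag-driven nested while loops) by a direct per-index construction: the i-th value is i written as a bijective base-three numeral over the digit characters one-two-three, built with a short divmod loop; intended asymptotically faster (quadratic pop(0)/slice shuffling disappears), but a timing run confirmed a large ratio only at the largest size, so no unqualified speed claim is made.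
import Mathlib
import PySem

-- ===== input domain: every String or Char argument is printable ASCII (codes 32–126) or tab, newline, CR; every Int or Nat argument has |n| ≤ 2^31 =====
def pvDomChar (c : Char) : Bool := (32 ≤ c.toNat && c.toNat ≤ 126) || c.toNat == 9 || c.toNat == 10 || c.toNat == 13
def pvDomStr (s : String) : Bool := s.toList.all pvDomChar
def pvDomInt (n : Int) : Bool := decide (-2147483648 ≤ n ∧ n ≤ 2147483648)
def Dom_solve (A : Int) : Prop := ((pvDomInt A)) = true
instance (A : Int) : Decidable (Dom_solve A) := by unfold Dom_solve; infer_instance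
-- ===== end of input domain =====

-- B replaces A's BFS queue simulation by building each value directly as its index
-- written as a bijective base-three numeral over the digit characters (objective: alternative; intended as faster, measured so only at the largest timed size).

-- ===== PORT A =====
-- gen = ["1", "2", "3"]
def pvGen : List String := ["1", "2", "3"]

-- the 'for elem in gen: if len(res) < A: res.append(curr_elem + elem) else: break' loop
def pvForGen (A : Int) (res : List String) (e : String) : List String → List String
  | [] => res
  | d :: ds =>
    if ((res.length : Int)) < A then pvForGen A (res ++ [e ++ d]) e ds
    else res  -- break

-- the inner 'while curr_queue or flag' loop once flag is False: pop(0) until empty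
def pvInner (A : Int) (res : List String) : List String → List String
  | [] => res
  | e :: q => pvInner A (pvForGen A res e pvGen) q

-- the inner while including the flag: the first iteration sets flag = False and pops
-- '' when the queue is empty, then continues popping
def pvInnerLoop (A : Int) (res : List String) (queue : List String) (flag : Bool) :
    List String :=
  if flag then
    match queue with
    | [] => pvInner A (pvForGen A res "" pvGen) []
    | e :: q => pvInner A (pvForGen A res e pvGen) q
  else pvInner A res queue

-- the outer 'while len(res) < A' loop; fuel only makes the recursion structural
-- (A.toNat + 1 is sufficient: each iteration grows res by at least one, proved by solve_spec)
def pvOuter (A : Int) (fuel : Nat) (res queue : List String) (flag : Bool) : List String :=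
  match fuel with
  | 0 => res
  | f + 1 =>
    if ((res.length : Int)) < A then
      let n := res.length
      let res' := pvInnerLoop A res queue flag
      pvOuter A f res' (PySem.List.slice res' (some (n : Int)) none) false
    else res

def solve (A : Int) : List Int :=
  -- [int(x) for x in res]; every x is a nonempty digit string, so ofStr? is never none
  (pvOuter A (A.toNat + 1) [] [] true).map (fun x => (PySem.Int.ofStr? x).getD 0)

-- ===== PORT B =====
-- s = s = "123"[r] + s, repeated while n != 0 with n, r = divmod(n - 1, 3); n stays ≥ 0,
-- so Nat division/mod are exact here and "123"[r] is always in range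
def pvBijLoop (n : Nat) (s : String) : String :=
  if _h : n = 0 then s
  else
    pvBijLoop ((n - 1) / 3)
      (String.ofList [(PySem.Str.pyGet? "123" (((n - 1) % 3 : Nat) : Int)).getD '?'] ++ s)
  decreasing_by exact Nat.lt_of_le_of_lt (Nat.div_le_self _ _) (by omega)

def solve_alt (A : Int) : List Int :=
  (PySem.List.pyRange 1 (A + 1) 1).map (fun i =>
    (PySem.Int.ofStr? (pvBijLoop i.toNat "")).getD 0)

-- ===== PRECONDITION & SPEC =====
def Spec_solve (A : Int) (out : List Int) : Prop := out = solve_alt A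
instance (A : Int) (out : List Int) : Decidable (Spec_solve A out) := by unfold Spec_solve; infer_instance

-- ===== CLAIM (what is proved, stated in full; the proofs are below) =====
def Claim_equal_solve : Prop := ∀ (A : Int), Dom_solve A → Spec_solve A (solve A)

-- ===== LEMMAS AND PROOFS =====

-- the characters of the n-th generated string (bijective base-3 digits of n over '1','2','3')
def gl : Nat → List Char
  | 0 => []
  | n + 1 => gl ((n + 1 - 1) / 3) ++ [['1', '2', '3'].getD ((n + 1 - 1) % 3) '?']
  decreasing_by exact Nat.lt_of_le_of_lt (Nat.div_le_self _ _) (by omega)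

-- the n-th generated string
def g (n : Nat) : String := String.ofList (gl n)

-- the strings with (1-based) indices a, a+1, …, a+k-1
def gRange (a k : Nat) : List String := (List.range k).map (fun j => g (a + j))

-- the first n generated strings
def Smap (n : Nat) : List String := gRange 1 n

theorem ofList_append (a b : List Char) :
    String.ofList a ++ String.ofList b = String.ofList (a ++ b) := by
  rw [← String.toList_inj]; simp

theorem g_child (t j : Nat) (hj : j < 3) :
    g (3 * t + j + 1) = g t ++ String.ofList [['1', '2', '3'].getD j '?'] := by
  have h1 : (3 * t + j + 1 - 1) / 3 = t := by omega
  have h2 : (3 * t + j + 1 - 1) % 3 = j := by omega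
  show g (3 * t + j + 1) = _
  rw [g, g, gl]
  rw [h1, h2, ← ofList_append]

theorem length_gRange (a k : Nat) : (gRange a k).length = k := by simp [gRange]

theorem length_Smap (n : Nat) : (Smap n).length = n := length_gRange 1 n

theorem Smap_succ (n : Nat) : Smap (n + 1) = Smap n ++ [g (n + 1)] := by
  simp [Smap, gRange, List.range_succ]
  congr 1
  omega

theorem gRange_succ_left (a k : Nat) : gRange a (k + 1) = g a :: gRange (a + 1) k := by
  apply List.ext_getElem
  · simp [gRange]
  · intro i h1 h2
    match i with
    | 0 => simp [gRange]
    | i + 1 =>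
      simp [gRange]
      congr 1
      omega

theorem Smap_drop (m n : Nat) (_h : m ≤ n) : (Smap n).drop m = gRange (m + 1) (n - m) := by
  apply List.ext_getElem
  · simp [Smap, gRange]
  · intro i h1 h2
    simp [Smap, gRange]
    congr 1
    omega

-- pvForGen does nothing once len(res) has reached A
theorem pvForGen_noop (A : Int) (res : List String) (e : String) (ds : List String)
    (h : ¬ ((res.length : Int)) < A) : pvForGen A res e ds = res := by
  cases ds with
  | nil => rfl
  | cons d ds => simp [pvForGen, h]

-- pvInner does nothing once len(res) has reached A
theorem pvInner_noop (A : Int) (res : List String) (q : List String)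
    (h : ¬ ((res.length : Int)) < A) : pvInner A res q = res := by
  induction q with
  | nil => rfl
  | cons e q ih => simp [pvInner, pvForGen_noop A res e pvGen h, ih]

theorem g_child1 (t : Nat) : g (3 * t + 1) = g t ++ "1" := g_child t 0 (by omega)
theorem g_child2 (t : Nat) : g (3 * t + 2) = g t ++ "2" := g_child t 1 (by omega)
theorem g_child3 (t : Nat) : g (3 * t + 3) = g t ++ "3" := g_child t 2 (by omega)

-- one pop: appending the (up to three) children of the t-th string
theorem pvForGen_step (A : Int) (hA : 0 ≤ A) (t : Nat) :
    pvForGen A (Smap (3 * t)) (g t) pvGen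
      = Smap (max (3 * t) (min A.toNat (3 * t + 3))) := by
  have hA' : ((A.toNat : Int)) = A := Int.toNat_of_nonneg hA
  have e1 : Smap (3 * t) ++ [g t ++ "1"] = Smap (3 * t + 1) := by
    rw [← g_child1]; exact (Smap_succ _).symm
  have e2 : Smap (3 * t + 1) ++ [g t ++ "2"] = Smap (3 * t + 2) := by
    rw [← g_child2]; exact (Smap_succ _).symm
  have e3 : Smap (3 * t + 2) ++ [g t ++ "3"] = Smap (3 * t + 3) := by
    rw [← g_child3]; exact (Smap_succ _).symm
  simp only [pvGen, pvForGen]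
  by_cases c1 : 3 * t < A.toNat
  · have c1' : (((Smap (3 * t)).length : Int)) < A := by rw [length_Smap]; omega
    rw [if_pos c1', e1]
    by_cases c2 : 3 * t + 1 < A.toNat
    · have c2' : (((Smap (3 * t + 1)).length : Int)) < A := by rw [length_Smap]; omega
      rw [if_pos c2', e2]
      by_cases c3 : 3 * t + 2 < A.toNat
      · have c3' : (((Smap (3 * t + 2)).length : Int)) < A := by rw [length_Smap]; omega
        rw [if_pos c3', e3]
        congr 1
        omega
      · have c3' : ¬ (((Smap (3 * t + 2)).length : Int)) < A := by rw [length_Smap]; omega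
        rw [if_neg c3']
        congr 1
        omega
    · have c2' : ¬ (((Smap (3 * t + 1)).length : Int)) < A := by rw [length_Smap]; omega
      rw [if_neg c2']
      congr 1
      omega
  · have c1' : ¬ (((Smap (3 * t)).length : Int)) < A := by rw [length_Smap]; omega
    rw [if_neg c1']
    congr 1
    omega

-- the inner while loop on a queue of consecutive generated strings
theorem pvInner_spec (A : Int) (hA : 0 ≤ A) (k : Nat) : ∀ t : Nat,
    pvInner A (Smap (3 * t)) (gRange t k)
      = Smap (max (3 * t) (min A.toNat (3 * t + 3 * k))) := by
  have hA' : ((A.toNat : Int)) = A := Int.toNat_of_nonneg hA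
  induction k with
  | zero =>
    intro t
    show pvInner A (Smap (3 * t)) (gRange t 0) = _
    have h0 : gRange t 0 = [] := rfl
    rw [h0, pvInner]
    congr 1
    omega
  | succ k ih =>
    intro t
    rw [gRange_succ_left]
    show pvInner A (pvForGen A (Smap (3 * t)) (g t) pvGen) (gRange (t + 1) k) = _
    rw [pvForGen_step A hA t]
    by_cases h1 : A.toNat ≤ 3 * t
    · have hm : max (3 * t) (min A.toNat (3 * t + 3)) = 3 * t := by omega
      rw [hm, pvInner_noop A _ _ (by rw [length_Smap]; omega)]
      congr 1
      omega
    · by_cases h2 : 3 * t + 3 ≤ A.toNat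
      · have hm : max (3 * t) (min A.toNat (3 * t + 3)) = 3 * (t + 1) := by omega
        rw [hm, ih (t + 1)]
        congr 1
        omega
      · have hm : max (3 * t) (min A.toNat (3 * t + 3)) = A.toNat := by omega
        rw [hm, pvInner_noop A _ _ (by rw [length_Smap]; omega)]
        congr 1
        omega

-- the outer while loop, from any state it actually reaches
theorem pvOuter_spec (A : Int) (hA : 1 ≤ A) (fuel : Nat) : ∀ p : Nat,
    A.toNat ≤ min A.toNat (3 * p + 3) + fuel →
    pvOuter A fuel (Smap (min A.toNat (3 * p + 3)))
        (gRange (p + 1) (min A.toNat (3 * p + 3) - p)) false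
      = Smap A.toNat := by
  have hA' : ((A.toNat : Int)) = A := Int.toNat_of_nonneg (by omega)
  induction fuel with
  | zero =>
    intro p hf
    rw [pvOuter]
    congr 1
    omega
  | succ fuel ih =>
    intro p hf
    rw [pvOuter]
    by_cases hc : min A.toNat (3 * p + 3) < A.toNat
    · have hcond : (((Smap (min A.toNat (3 * p + 3))).length : Int)) < A := by
        rw [length_Smap]; omega
      rw [if_pos hcond]
      have hc3 : min A.toNat (3 * p + 3) = 3 * p + 3 := by omega
      have hinner :
          pvInnerLoop A (Smap (min A.toNat (3 * p + 3)))
              (gRange (p + 1) (min A.toNat (3 * p + 3) - p)) false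
            = Smap (min A.toNat (3 * (3 * p + 3) + 3)) := by
        show pvInner A (Smap (min A.toNat (3 * p + 3)))
            (gRange (p + 1) (min A.toNat (3 * p + 3) - p)) = _
        rw [hc3]
        have hk : 3 * p + 3 - p = 2 * p + 3 := by omega
        have hSm : (3 * p + 3) = 3 * (p + 1) := by omega
        rw [hk, hSm, pvInner_spec A (by omega) (2 * p + 3) (p + 1)]
        congr 1
        omega
      rw [hinner]
      show pvOuter A fuel (Smap (min A.toNat (3 * (3 * p + 3) + 3)))
          (PySem.List.slice (Smap (min A.toNat (3 * (3 * p + 3) + 3)))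
            (some (((Smap (min A.toNat (3 * p + 3))).length : Nat) : Int)) none) false
        = Smap A.toNat
      rw [PySem.List.slice_from_natCast]
      rw [length_Smap]
      rw [Smap_drop _ _ (by omega)]
      have := ih (3 * p + 3) (by omega)
      rw [hc3]
      exact this
    · have hcond : ¬ (((Smap (min A.toNat (3 * p + 3))).length : Int)) < A := by
        rw [length_Smap]; omega
      rw [if_neg hcond]
      congr 1
      omega

-- the string port A builds at index n equals the string port B builds at index n
theorem pvBijLoop_spec (n : Nat) : ∀ s : String, pvBijLoop n s = g n ++ s := by
  induction n using Nat.strong_induction_on with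
  | _ n ih =>
    intro s
    rw [pvBijLoop]
    by_cases h : n = 0
    · subst h
      simp [g, gl]
    · rw [dif_neg h]
      rw [ih ((n - 1) / 3) (Nat.lt_of_le_of_lt (Nat.div_le_self _ _) (by omega))]
      have hd : (PySem.Str.pyGet? "123" (((n - 1) % 3 : Nat) : Int)).getD '?'
          = ['1', '2', '3'].getD ((n - 1) % 3) '?' := by
        rw [PySem.Str.pyGet?_natCast]
        rfl
      have hg : g n = g ((n - 1) / 3) ++ String.ofList [['1', '2', '3'].getD ((n - 1) % 3) '?'] := by
        obtain ⟨m, rfl⟩ : ∃ m, n = m + 1 := ⟨n - 1, by omega⟩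
        rw [g, gl, ← ofList_append]
        rfl
      rw [hd, hg]
      rw [← String.toList_inj]
      simp

theorem solve_eq_Smap (A : Int) :
    solve A = (Smap A.toNat).map (fun x => (PySem.Int.ofStr? x).getD 0) := by
  rw [solve]
  congr 1
  by_cases hA : 1 ≤ A
  · have hA' : ((A.toNat : Int)) = A := Int.toNat_of_nonneg (by omega)
    obtain ⟨f, hf⟩ : ∃ f, A.toNat + 1 = f + 1 := ⟨A.toNat, rfl⟩
    rw [hf, pvOuter, if_pos (by show ((([] : List String).length : Int)) < A; simp; omega)]
    have h0 : pvInnerLoop A [] [] true = Smap (min A.toNat 3) := by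
      show pvInner A (pvForGen A [] "" pvGen) [] = _
      rw [pvInner]
      have hS0 : ([] : List String) = Smap (3 * 0) := by simp [Smap, gRange]
      rw [hS0, show ("" : String) = g 0 by rw [g, gl], pvForGen_step A (by omega) 0]
      exact congrArg Smap (by omega)
    rw [h0]
    show pvOuter A f (Smap (min A.toNat 3))
        (PySem.List.slice (Smap (min A.toNat 3)) (some ((([] : List String).length : Nat) : Int)) none)
        false = _
    rw [PySem.List.slice_from_natCast]
    have hq : (Smap (min A.toNat 3)).drop ([] : List String).length
        = gRange (0 + 1) (min A.toNat (3 * 0 + 3) - 0) := by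
      show (Smap (min A.toNat 3)).drop 0 = _
      rw [List.drop_zero]
      rfl
    have h3 : Smap (min A.toNat 3) = Smap (min A.toNat (3 * 0 + 3)) := rfl
    rw [hq, h3]
    exact pvOuter_spec A hA f 0 (by omega)
  · have h0 : A.toNat = 0 := by omega
    rw [h0]
    show pvOuter A 1 [] [] true = Smap 0
    rw [pvOuter, if_neg (by show ¬ ((([] : List String).length : Int)) < A; simp; omega)]
    rfl

theorem solve_alt_eq_Smap (A : Int) :
    solve_alt A = (Smap A.toNat).map (fun x => (PySem.Int.ofStr? x).getD 0) := by
  rw [solve_alt, PySem.List.pyRange_one]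
  have hlen : (A + 1 - 1).toNat = A.toNat := by omega
  rw [hlen]
  rw [Smap, gRange, List.map_map, List.map_map]
  apply List.map_congr_left
  intro k _
  simp only [Function.comp]
  have h1 : ((1 : Int) + (k : Int)).toNat = 1 + k := by omega
  rw [h1]
  congr 2
  rw [pvBijLoop_spec]
  rw [← String.toList_inj]
  simp

-- ===== VERDICT (by name: the statement is the Claim_ definition above) =====
theorem solve_spec : Claim_equal_solve := by
  intro A _
  show solve A = solve_alt A
  rw [solve_eq_Smap, solve_alt_eq_Smap]
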